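-- pv_equiv track=rewrite | github.com/AIlhomov/Kattis | champernowneverification.py | find_champernowne_position
-- ===== SOURCE A (Python) =====
-- def find_champernowne_position(N_str):
--     champernowne, k = "", 0
--     while len(champernowne) < len(N_str):
--         k += 1
--         champernowne += str(k)
--
--     if champernowne.startswith(N_str):
--         return k
--     else:
--         return -1
-- ===== SOURCE B (Python) =====
-- def find_champernowne_position(N_str):
--     n = len(N_str)
--     pos = 0
--     k = 0
--     while pos < n:
--         k += 1
--         for c in str(k):
--             if N_str[pos] != c:
--                 return -1
--             pos += 1
--             if pos >= n:
--                 break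
--     return k
-- ===== Notes on version B (the rewrite author's own statement) =====
-- stated objective: faster
-- what changed: B drops A's whole-prefix string accumulation and final startswith, instead interleaving digit generation with character-by-character comparison over a single position index, so no prefix string is ever built.
import Mathlib
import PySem

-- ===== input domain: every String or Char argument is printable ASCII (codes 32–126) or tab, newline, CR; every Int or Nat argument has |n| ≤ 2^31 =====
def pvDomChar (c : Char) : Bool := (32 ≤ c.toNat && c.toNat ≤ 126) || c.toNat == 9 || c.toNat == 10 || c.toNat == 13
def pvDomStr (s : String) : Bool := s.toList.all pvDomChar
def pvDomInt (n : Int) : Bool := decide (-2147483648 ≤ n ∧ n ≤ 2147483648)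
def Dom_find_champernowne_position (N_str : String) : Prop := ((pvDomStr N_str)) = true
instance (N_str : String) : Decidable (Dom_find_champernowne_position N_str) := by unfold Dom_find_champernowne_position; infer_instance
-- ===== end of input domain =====

-- B replaces A's whole-prefix string accumulation + startswith by a single interleaved
-- generate-and-compare pass keeping only a position index, avoiding the repeated string
-- concatenation (objective: faster; measured faster in a timing run).

-- str(k) is never the empty string (termination helper for both ports)
theorem pvToDigitsCore_len_le (b : Nat) : ∀ (fuel n : Nat) (ds : List Char),
    ds.length ≤ (Nat.toDigitsCore b fuel n ds).length := by
  intro fuel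
  induction fuel with
  | zero => intro n ds; simp [Nat.toDigitsCore]
  | succ f ih =>
    intro n ds
    simp only [Nat.toDigitsCore]
    split
    · simp
    · exact le_trans (by simp) (ih (n / b) ((n % b).digitChar :: ds))

theorem pvToChars_ne_nil (k : Int) : PySem.Int.toChars k ≠ [] := by
  have hd : ∀ m : Nat, Nat.toDigits 10 m ≠ [] := by
    intro m
    show Nat.toDigitsCore 10 (m + 1) m [] ≠ []
    simp only [Nat.toDigitsCore]
    split
    · simp
    · intro hc
      have h := pvToDigitsCore_len_le 10 m (m / 10) [(m % 10).digitChar]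
      rw [hc] at h; simp at h
  unfold PySem.Int.toChars
  split
  · simp
  · exact hd _

-- ===== PORT A =====
-- while len(champernowne) < len(N_str): k += 1; champernowne += str(k)
def pvALoop (n : List Char) (ch : List Char) (k : Int) : List Char × Int :=
  if ch.length < n.length then
    pvALoop n (ch ++ PySem.Int.toChars (k + 1)) (k + 1)
  else (ch, k)
termination_by n.length - ch.length
decreasing_by
  have h1 : PySem.Int.toChars (k + 1) ≠ [] := pvToChars_ne_nil (k + 1)
  have h2 : 0 < (PySem.Int.toChars (k + 1)).length := List.length_pos_iff.mpr h1
  simp only [List.length_append]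
  omega

def find_champernowne_position (N_str : String) : Int :=
  let p := pvALoop N_str.toList [] 0
  if PySem.Chars.startswith p.1 N_str.toList then p.2 else -1

-- ===== PORT B =====
-- inner 'for c in str(k)': compare N_str[pos] with c, advance pos, break once pos = len
def pvSeg (n : List Char) (pos : Nat) : List Char → Option Nat
  | [] => some pos
  | c :: rest =>
    if n[pos]? ≠ some c then none
    else if pos + 1 ≥ n.length then some (pos + 1)
    else pvSeg n (pos + 1) rest

theorem pvSeg_le (n : List Char) : ∀ (d : List Char) (pos pos' : Nat),
    pvSeg n pos d = some pos' → pos ≤ pos' := by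
  intro d
  induction d with
  | nil => intro pos pos' h; simp [pvSeg] at h; omega
  | cons c rest ih =>
    intro pos pos' h
    simp only [pvSeg] at h
    split at h
    · exact absurd h (by simp)
    · split at h
      · simp at h; omega
      · exact le_trans (Nat.le_succ pos) (ih (pos + 1) pos' h)

theorem pvSeg_lt (n : List Char) (d : List Char) (pos pos' : Nat) (hd : d ≠ [])
    (h : pvSeg n pos d = some pos') : pos < pos' := by
  cases d with
  | nil => exact absurd rfl hd
  | cons c rest =>
    simp only [pvSeg] at h
    split at h
    · exact absurd h (by simp)
    · split at h
      · simp at h; omega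
      · exact lt_of_lt_of_le (Nat.lt_succ_self pos) (pvSeg_le n rest (pos + 1) pos' h)

def pvBLoop (n : List Char) (pos : Nat) (k : Int) : Int :=
  if _h : pos < n.length then
    match hs : pvSeg n pos (PySem.Int.toChars (k + 1)) with
    | none => -1
    | some pos' => pvBLoop n pos' (k + 1)
  else k
termination_by n.length - pos
decreasing_by
  have := pvSeg_lt n (PySem.Int.toChars (k + 1)) pos pos' (pvToChars_ne_nil (k + 1)) hs
  omega

def find_champernowne_position_alt (N_str : String) : Int :=
  pvBLoop N_str.toList 0 0

-- ===== PRECONDITION & SPEC =====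
def Spec_find_champernowne_position (N_str : String) (out : Int) : Prop := out = find_champernowne_position_alt N_str
instance (N_str : String) (out : Int) : Decidable (Spec_find_champernowne_position N_str out) := by unfold Spec_find_champernowne_position; infer_instance

-- ===== CLAIM (what is proved, stated in full; the proofs are below) =====
def Claim_equal_find_champernowne_position : Prop := ∀ (N_str : String), Dom_find_champernowne_position N_str → Spec_find_champernowne_position N_str (find_champernowne_position N_str)

-- ===== LEMMAS AND PROOFS =====

-- A's loop only ever appends: its result extends the accumulator and reaches length ≥ len(n)
theorem pvALoop_extend (n : List Char) : ∀ (ch : List Char) (k : Int),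
    (∃ t, (pvALoop n ch k).1 = ch ++ t) ∧ n.length ≤ (pvALoop n ch k).1.length := by
  intro ch k
  induction ch, k using pvALoop.induct n with
  | case1 ch k hlt ih =>
    rw [pvALoop, if_pos hlt]
    obtain ⟨⟨t, ht⟩, hlen⟩ := ih
    exact ⟨⟨PySem.Int.toChars (k + 1) ++ t, by rw [ht, List.append_assoc]⟩, hlen⟩
  | case2 ch k hge =>
    rw [pvALoop, if_neg hge]
    exact ⟨⟨[], by simp⟩, by show n.length ≤ ch.length; omega⟩

-- characterization of the inner digit-matching pass
theorem pvSeg_eq (n : List Char) : ∀ (d : List Char) (pos : Nat), pos < n.length →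
    pvSeg n pos d =
      (if n.drop pos <+: d then some n.length
       else if d <+: n.drop pos then some (pos + d.length)
       else none) := by
  intro d
  induction d with
  | nil =>
    intro pos hp
    rw [List.drop_eq_getElem_cons hp]
    simp [pvSeg]
    omega
  | cons c rest ih =>
    intro pos hp
    have hget : n[pos]? = some n[pos] := List.getElem?_eq_getElem hp
    by_cases hc : n[pos] = c
    · subst hc
      rw [List.drop_eq_getElem_cons hp]
      by_cases hend : pos + 1 ≥ n.length
      · have hdrop : n.drop (pos + 1) = [] := List.drop_eq_nil_of_le hend
        have hlen : n.length = pos + 1 := by omega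
        rw [hdrop]
        simp [pvSeg, List.cons_prefix_cons, hlen]
      · rw [show pvSeg n pos (n[pos] :: rest) = pvSeg n (pos + 1) rest from by
          simp [pvSeg, hget, hend]]
        rw [ih (pos + 1) (by omega),
          List.drop_eq_getElem_cons (show pos + 1 < n.length by omega)]
        simp only [List.cons_prefix_cons, true_and, List.length_cons]
        rw [show pos + 1 + rest.length = pos + (rest.length + 1) from by omega]
    · have hnot1 : ¬ (n.drop pos <+: c :: rest) := by
        rw [List.drop_eq_getElem_cons hp, List.cons_prefix_cons]
        exact fun h => hc h.1
      have hnot2 : ¬ (c :: rest <+: n.drop pos) := by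
        rw [List.drop_eq_getElem_cons hp, List.cons_prefix_cons]
        exact fun h => hc h.1.symm
      simp [pvSeg, hget, hc, hnot1, hnot2]

-- unfolding B's outer loop
theorem pvBLoop_stop (n : List Char) (pos : Nat) (k : Int) (h : ¬ pos < n.length) :
    pvBLoop n pos k = k := by
  rw [pvBLoop, dif_neg h]

theorem pvBLoop_none (n : List Char) (pos : Nat) (k : Int) (hp : pos < n.length)
    (hs : pvSeg n pos (PySem.Int.toChars (k + 1)) = none) : pvBLoop n pos k = -1 := by
  rw [pvBLoop, dif_pos hp]
  split
  · rfl
  · rename_i pos' heq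
    rw [hs] at heq
    cases heq

theorem pvBLoop_some (n : List Char) (pos : Nat) (k : Int) (pos' : Nat) (hp : pos < n.length)
    (hs : pvSeg n pos (PySem.Int.toChars (k + 1)) = some pos') :
    pvBLoop n pos k = pvBLoop n pos' (k + 1) := by
  rw [pvBLoop, dif_pos hp]
  split
  · rename_i heq
    rw [hs] at heq
    cases heq
  · rename_i p heq
    rw [hs] at heq
    injection heq with heq
    rw [heq]

-- main invariant: when pos characters are already matched, A's finish agrees with B's loop
theorem pvMain (n : List Char) : ∀ (fuel pos : Nat) (k : Int), n.length - pos ≤ fuel →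
    pos < n.length →
    (if PySem.Chars.startswith (pvALoop n (n.take pos) k).1 n then (pvALoop n (n.take pos) k).2
     else -1) = pvBLoop n pos k := by
  intro fuel
  induction fuel with
  | zero => intro pos k hf hp; omega
  | succ fuel ih =>
    intro pos k hf hp
    have htk : (n.take pos).length = pos := by simp; omega
    have hA : pvALoop n (n.take pos) k
        = pvALoop n (n.take pos ++ PySem.Int.toChars (k + 1)) (k + 1) := by
      rw [pvALoop]; rw [if_pos (by omega)]
    set d := PySem.Int.toChars (k + 1) with hd
    have hdne : d ≠ [] := pvToChars_ne_nil (k + 1)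
    have hdpos : 0 < d.length := List.length_pos_iff.mpr hdne
    have hseg := pvSeg_eq n d pos hp
    by_cases h1 : n.drop pos <+: d
    · -- remaining string exhausted inside this str(k+1): both return k+1
      obtain ⟨t, ht⟩ := id h1
      have hlen : n.length - pos ≤ d.length := by
        have := congrArg List.length ht
        simp [List.length_drop] at this
        omega
      have hstop : ¬ (n.take pos ++ d).length < n.length := by
        simp only [List.length_append, htk]
        omega
      have hA2 : pvALoop n (n.take pos ++ d) (k + 1) = (n.take pos ++ d, k + 1) := by
        rw [pvALoop, if_neg hstop]
      have hpre : n <+: n.take pos ++ d := by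
        refine ⟨t, ?_⟩
        conv_lhs => rw [← List.take_append_drop pos n]
        rw [← ht, List.append_assoc]
      have hs1 : pvSeg n pos (PySem.Int.toChars (k + 1)) = some n.length := by
        rw [← hd, hseg, if_pos h1]
      rw [pvBLoop_some n pos k n.length hp hs1, pvBLoop_stop n n.length (k + 1) (by omega)]
      rw [hA, hA2]
      simp [(PySem.Chars.startswith_iff _ _).mpr hpre]
    · by_cases h2 : d <+: n.drop pos
      · -- str(k+1) matched completely: advance pos and recurse
        obtain ⟨t, ht⟩ := id h2
        have htne : t ≠ [] := by
          intro hte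
          rw [hte, List.append_nil] at ht
          exact h1 (by rw [ht])
        have hlen : d.length < n.length - pos := by
          have h3 := congrArg List.length ht
          have h4 := List.length_pos_iff.mpr htne
          simp only [List.length_append, List.length_drop] at h3
          omega
        have htake : n.take (pos + d.length) = n.take pos ++ d := by
          conv_lhs => rw [← List.take_append_drop pos n, ← ht]
          rw [List.take_append, List.take_of_length_le (by rw [htk]; omega), htk,
            show pos + d.length - pos = d.length from by omega, List.take_left]
        have hs2 : pvSeg n pos (PySem.Int.toChars (k + 1)) = some (pos + d.length) := by
          rw [← hd, hseg, if_neg h1, if_pos h2]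
        rw [pvBLoop_some n pos k (pos + d.length) hp hs2, hA, ← htake]
        exact ih (pos + d.length) (k + 1) (by omega) (by omega)
      · -- mismatch inside str(k+1): B returns -1; A's comparison fails too
        have hs3 : pvSeg n pos (PySem.Int.toChars (k + 1)) = none := by
          rw [← hd, hseg, if_neg h1, if_neg h2]
        rw [pvBLoop_none n pos k hp hs3, hA]
        obtain ⟨⟨t, ht⟩, _⟩ := pvALoop_extend n (n.take pos ++ d) (k + 1)
        rw [if_neg ?_]
        intro hsw
        have hpre : n <+: (n.take pos ++ d) ++ t := by
          rw [← ht]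
          exact (PySem.Chars.startswith_iff _ _).mp hsw
        obtain ⟨u, hu⟩ := hpre
        rw [List.append_assoc] at hu
        conv_lhs at hu => rw [← List.take_append_drop pos n, List.append_assoc]
        have hcan : n.drop pos ++ u = d ++ t := List.append_cancel_left hu
        have hdp : n.drop pos <+: d ++ t := ⟨u, hcan⟩
        rcases List.prefix_or_prefix_of_prefix (List.prefix_append d t) hdp with h | h
        · exact h2 h
        · exact h1 h

-- ===== VERDICT (by name: the statement is the Claim_ definition above) =====
theorem find_champernowne_position_spec : Claim_equal_find_champernowne_position := by
  intro N_str _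
  unfold Spec_find_champernowne_position find_champernowne_position find_champernowne_position_alt
  by_cases h : 0 < N_str.toList.length
  · have := pvMain N_str.toList N_str.toList.length 0 0 (by omega) h
    simpa using this
  · have hnil : N_str.toList = [] := List.eq_nil_of_length_eq_zero (by omega)
    rw [hnil, pvBLoop_stop [] 0 0 (by simp)]
    rw [pvALoop]
    simp [PySem.Chars.startswith]
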